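-- pv_equiv track=rewrite | github.com/gveni/cvnlp_machinelearning | python_tutorial/string_manipulation.py | get_v_and_c
-- ===== SOURCE A (Python) =====
-- def get_v_and_c(ip_str):
--     vowels = []
--     consonants = []
--     vowel_list = ['a', 'A', 'e', 'E', 'i', 'I', 'o', 'O', 'u', 'U']
--     for i in ip_str:
--         if i in vowel_list:
--             if not i in vowels:
--                 vowels.append(i)
--         else:
--             if not i in consonants:
--                 consonants.append(i)
--     return vowels, consonants
-- ===== SOURCE B (Python) =====
-- def get_v_and_c(ip_str):
--     unique = list(dict.fromkeys(ip_str))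
--     vowel_set = {'a', 'A', 'e', 'E', 'i', 'I', 'o', 'O', 'u', 'U'}
--     vowels = [c for c in unique if c in vowel_set]
--     consonants = [c for c in unique if c not in vowel_set]
--     return vowels, consonants
-- ===== Notes on version B (the rewrite author's own statement) =====
-- stated objective: faster
-- what changed: B deduplicates the whole string once with a hash-based dict.fromkeys and then partitions the ordered-unique characters into vowels and consonants in two filter passes, replacing A's per-character linear membership scans of the growing vowel/consonant lists.
import Mathlib
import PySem

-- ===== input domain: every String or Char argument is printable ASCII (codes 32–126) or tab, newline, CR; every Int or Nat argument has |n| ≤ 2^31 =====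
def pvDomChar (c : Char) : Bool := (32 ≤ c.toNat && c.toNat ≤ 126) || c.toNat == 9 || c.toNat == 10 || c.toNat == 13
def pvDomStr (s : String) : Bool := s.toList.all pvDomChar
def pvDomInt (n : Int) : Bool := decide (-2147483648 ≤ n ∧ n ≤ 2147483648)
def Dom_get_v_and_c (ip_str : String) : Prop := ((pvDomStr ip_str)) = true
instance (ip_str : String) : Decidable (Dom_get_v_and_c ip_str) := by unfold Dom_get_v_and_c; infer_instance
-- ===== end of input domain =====

-- B deduplicates the string once (dict.fromkeys) and then partitions the ordered-unique
-- characters into vowels and consonants by two filters, instead of A's one loop that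
-- classifies each character and deduplicates each output list separately. Same results; objective: faster (hash dedup replaces linear list scans).

-- ===== PORT A =====
def pvVowelList : List String := ["a", "A", "e", "E", "i", "I", "o", "O", "u", "U"]

def pvStepA (acc : List String × List String) (i : String) : List String × List String :=
  if pvVowelList.contains i then
    if !acc.1.contains i then (acc.1 ++ [i], acc.2) else acc
  else
    if !acc.2.contains i then (acc.1, acc.2 ++ [i]) else acc

def get_v_and_c (ip_str : String) : List String × List String :=
  (ip_str.toList.map (fun c => String.ofList [c])).foldl pvStepA ([], [])

-- ===== PORT B =====
def get_v_and_c_alt (ip_str : String) : List String × List String :=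
  let unique := PySem.List.dedup (ip_str.toList.map (fun c => String.ofList [c]))
  (unique.filter (fun c => pvVowelList.contains c),
   unique.filter (fun c => !pvVowelList.contains c))

-- ===== PRECONDITION & SPEC =====
def Spec_get_v_and_c (ip_str : String) (out : List String × List String) : Prop := out = get_v_and_c_alt ip_str
instance (ip_str : String) (out : List String × List String) : Decidable (Spec_get_v_and_c ip_str out) := by unfold Spec_get_v_and_c; infer_instance

-- ===== CLAIM (what is proved, stated in full; the proofs are below) =====
def Claim_equal_get_v_and_c : Prop := ∀ (ip_str : String), Dom_get_v_and_c ip_str → Spec_get_v_and_c ip_str (get_v_and_c ip_str)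

-- ===== LEMMAS AND PROOFS =====

-- A's loop starting from a partitioned accumulator stays the partition of the running dedup.
theorem pv_loop_eq (L : List String) : ∀ (u : List String),
    L.foldl pvStepA (u.filter (fun c => pvVowelList.contains c),
                     u.filter (fun c => !pvVowelList.contains c))
    = ((L.foldl PySem.Set.add u).filter (fun c => pvVowelList.contains c),
       (L.foldl PySem.Set.add u).filter (fun c => !pvVowelList.contains c)) := by
  induction L with
  | nil => intro u; rfl
  | cons i L ih =>
    intro u
    by_cases hu : i ∈ u
    · have hadd : PySem.Set.add u i = u := by
        simp [PySem.Set.add, hu]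
      have hstep : pvStepA (u.filter (fun c => pvVowelList.contains c),
                            u.filter (fun c => !pvVowelList.contains c)) i
          = (u.filter (fun c => pvVowelList.contains c),
             u.filter (fun c => !pvVowelList.contains c)) := by
        by_cases hv : i ∈ pvVowelList
        · simp [pvStepA, List.mem_filter, hu, hv]
        · simp [pvStepA, List.mem_filter, hu, hv]
      simp only [List.foldl_cons, hstep, hadd, ih u]
    · have hadd : PySem.Set.add u i = u ++ [i] := by
        simp [PySem.Set.add, hu]
      have hstep : pvStepA (u.filter (fun c => pvVowelList.contains c),
                            u.filter (fun c => !pvVowelList.contains c)) i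
          = ((u ++ [i]).filter (fun c => pvVowelList.contains c),
             (u ++ [i]).filter (fun c => !pvVowelList.contains c)) := by
        by_cases hv : i ∈ pvVowelList
        · simp [pvStepA, List.mem_filter, hu, hv, List.filter_append]
        · simp [pvStepA, List.mem_filter, hu, hv, List.filter_append]
      simp only [List.foldl_cons, hstep, hadd, ih (u ++ [i])]

-- ===== VERDICT (by name: the statement is the Claim_ definition above) =====
theorem get_v_and_c_spec : Claim_equal_get_v_and_c := by
  intro ip_str _
  unfold Spec_get_v_and_c get_v_and_c get_v_and_c_alt
  have h := pv_loop_eq (ip_str.toList.map (fun c => String.ofList [c])) []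
  simpa [PySem.List.dedup_eq_ofList, PySem.Set.ofList_eq_foldl] using h
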